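-- pv_equiv track=rewrite | github.com/vamsi-spec/medical-research | Backend/tools/drug_interaction.py | format_interaction_report
-- ===== SOURCE A (Python) =====
-- from typing import List, Dict, Optional
--
-- def format_interaction_report(
--
--     interactions: List[Dict]
-- ) -> str:
--     if not interactions:
--         return "No significant drug interactions detected"
--
--
--     major = [i for i in interactions if i['severity'] == 'Major']
--     moderate = [i for i in interactions if i['severity'] == 'Moderate']
--     minor = [i for i in interactions if i['severity'] == 'Minor']
--
--
--     report_parts = []
--
--     report_parts.append("⚠️ DRUG INTERACTION REPORT")
--     report_parts.append("=" * 70)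
--     report_parts.append(f"Total interactions found: {len(interactions)}")
--     report_parts.append("")
--
--     if major:
--         report_parts.append("🔴 MAJOR INTERACTIONS (Contraindicated/Serious):")
--         report_parts.append("-" * 70)
--         for i, interaction in enumerate(major, 1):
--             report_parts.append(f"\n{i}. {interaction['drug1']} + {interaction['drug2']}")
--             report_parts.append(f"   {interaction['description']}")
--             report_parts.append(f"   ⚕️ Recommendation: {interaction['clinical_recommendation']}")
--             report_parts.append(f"   📊 Source: {interaction['data_source']}")
--
--     # Moderate interactions
--     if moderate:
--         report_parts.append("\n🟡 MODERATE INTERACTIONS (Requires monitoring):")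
--         report_parts.append("-" * 70)
--         for i, interaction in enumerate(moderate, 1):
--             report_parts.append(f"\n{i}. {interaction['drug1']} + {interaction['drug2']}")
--             report_parts.append(f"   {interaction['description']}")
--             report_parts.append(f"   ⚕️ Recommendation: {interaction['clinical_recommendation']}")
--
--     # Minor interactions
--     if minor:
--         report_parts.append("\n🟢 MINOR INTERACTIONS (Usually not clinically significant):")
--         report_parts.append("-" * 70)
--         for i, interaction in enumerate(minor, 1):
--             report_parts.append(f"\n{i}. {interaction['drug1']} + {interaction['drug2']}")
--             report_parts.append(f"   {interaction['description']}")
--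
--     return "\n".join(report_parts)
-- ===== SOURCE B (Python) =====
-- def format_interaction_report(interactions):
--     if not interactions:
--         return "No significant drug interactions detected"
--
--     # Single pass: each record is formatted immediately into its severity's
--     # buffer, with a running per-severity counter (no filtering passes).
--     counts = {"Major": 0, "Moderate": 0, "Minor": 0}
--     body = {"Major": [], "Moderate": [], "Minor": []}
--     for d in interactions:
--         sev = d['severity']
--         if sev not in counts:
--             continue
--         counts[sev] += 1
--         i = counts[sev]
--         ls = body[sev]
--         ls.append(f"\n{i}. {d['drug1']} + {d['drug2']}")
--         ls.append(f"   {d['description']}")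
--         if sev != "Minor":
--             ls.append(f"   ⚕️ Recommendation: {d['clinical_recommendation']}")
--         if sev == "Major":
--             ls.append(f"   📊 Source: {d['data_source']}")
--
--     parts = [
--         "⚠️ DRUG INTERACTION REPORT",
--         "=" * 70,
--         f"Total interactions found: {len(interactions)}",
--         "",
--     ]
--     if body["Major"]:
--         parts += ["🔴 MAJOR INTERACTIONS (Contraindicated/Serious):", "-" * 70]
--         parts += body["Major"]
--     if body["Moderate"]:
--         parts += ["\n🟡 MODERATE INTERACTIONS (Requires monitoring):", "-" * 70]
--         parts += body["Moderate"]
--     if body["Minor"]: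
--         parts += ["\n🟢 MINOR INTERACTIONS (Usually not clinically significant):", "-" * 70]
--         parts += body["Minor"]
--     return "\n".join(parts)
-- ===== Notes on version B (the rewrite author's own statement) =====
-- stated objective: alternative
-- what changed: Replaces A's three filter passes plus three separate formatting loops by a single pass over the input that dispatches each record once into per-severity line buffers with running counters, then stitches the buffers together.
import Mathlib
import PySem

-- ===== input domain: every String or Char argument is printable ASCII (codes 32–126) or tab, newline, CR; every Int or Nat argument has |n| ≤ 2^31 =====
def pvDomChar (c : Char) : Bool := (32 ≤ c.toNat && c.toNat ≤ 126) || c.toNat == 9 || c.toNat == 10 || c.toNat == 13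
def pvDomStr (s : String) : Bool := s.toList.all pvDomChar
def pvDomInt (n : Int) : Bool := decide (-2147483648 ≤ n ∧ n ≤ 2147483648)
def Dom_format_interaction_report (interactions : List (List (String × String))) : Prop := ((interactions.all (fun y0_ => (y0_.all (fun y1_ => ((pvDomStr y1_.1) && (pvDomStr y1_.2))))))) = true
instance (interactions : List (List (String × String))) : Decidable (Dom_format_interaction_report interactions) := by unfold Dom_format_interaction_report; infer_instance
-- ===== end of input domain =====

-- B replaces A's three filter passes plus three separate formatting loops by a single
-- pass that dispatches each record once into per-severity line buffers with running
-- counters; same cost, different decomposition.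

-- shared dict access: Python d[k]; the default "" is never reached on inputs inside Pre_
def pvGet (d : List (String × String)) (k : String) : String :=
  ((PySem.Dict.ofList d).get? k).getD ""

def pvEq70 : String := String.ofList (List.replicate 70 '=')
def pvDash70 : String := String.ofList (List.replicate 70 '-')

-- ===== PORT A =====
def pvMajorLines : List (List (String × String)) → Nat → List String
  | [], _ => []
  | d :: rest, i =>
      ("\n" ++ toString i ++ ". " ++ pvGet d "drug1" ++ " + " ++ pvGet d "drug2") ::
      ("   " ++ pvGet d "description") ::
      ("   ⚕️ Recommendation: " ++ pvGet d "clinical_recommendation") ::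
      ("   📊 Source: " ++ pvGet d "data_source") ::
      pvMajorLines rest (i + 1)

def pvModerateLines : List (List (String × String)) → Nat → List String
  | [], _ => []
  | d :: rest, i =>
      ("\n" ++ toString i ++ ". " ++ pvGet d "drug1" ++ " + " ++ pvGet d "drug2") ::
      ("   " ++ pvGet d "description") ::
      ("   ⚕️ Recommendation: " ++ pvGet d "clinical_recommendation") ::
      pvModerateLines rest (i + 1)

def pvMinorLines : List (List (String × String)) → Nat → List String
  | [], _ => []
  | d :: rest, i =>
      ("\n" ++ toString i ++ ". " ++ pvGet d "drug1" ++ " + " ++ pvGet d "drug2") ::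
      ("   " ++ pvGet d "description") ::
      pvMinorLines rest (i + 1)

def format_interaction_report (interactions : List (List (String × String))) : String :=
  if interactions.isEmpty then "No significant drug interactions detected"
  else
    let major := interactions.filter (fun d => pvGet d "severity" == "Major")
    let moderate := interactions.filter (fun d => pvGet d "severity" == "Moderate")
    let minor := interactions.filter (fun d => pvGet d "severity" == "Minor")
    let parts := ["⚠️ DRUG INTERACTION REPORT", pvEq70,
                  "Total interactions found: " ++ toString interactions.length, ""]
    let parts := parts ++ (if major.isEmpty then [] else
      "🔴 MAJOR INTERACTIONS (Contraindicated/Serious):" :: pvDash70 :: pvMajorLines major 1)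
    let parts := parts ++ (if moderate.isEmpty then [] else
      "\n🟡 MODERATE INTERACTIONS (Requires monitoring):" :: pvDash70 :: pvModerateLines moderate 1)
    let parts := parts ++ (if minor.isEmpty then [] else
      "\n🟢 MINOR INTERACTIONS (Usually not clinically significant):" :: pvDash70 :: pvMinorLines minor 1)
    PySem.Str.join "\n" parts

-- ===== PORT B =====
-- the lines appended for one record of severity `sev`, numbered `i` (Source B's loop body)
def pvRecordLines (sev : String) (i : Nat) (d : List (String × String)) : List String :=
  ("\n" ++ toString i ++ ". " ++ pvGet d "drug1" ++ " + " ++ pvGet d "drug2") ::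
  ("   " ++ pvGet d "description") ::
  ((if sev != "Minor" then ["   ⚕️ Recommendation: " ++ pvGet d "clinical_recommendation"] else [])
   ++ (if sev == "Major" then ["   📊 Source: " ++ pvGet d "data_source"] else []))

-- single-pass state: (counter, buffer) for Major, Moderate, Minor
def pvStep (st : (Nat × List String) × (Nat × List String) × (Nat × List String))
    (d : List (String × String)) : (Nat × List String) × (Nat × List String) × (Nat × List String) :=
  let sev := pvGet d "severity"
  if sev == "Major" then
    ((st.1.1 + 1, st.1.2 ++ pvRecordLines sev (st.1.1 + 1) d), st.2.1, st.2.2)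
  else if sev == "Moderate" then
    (st.1, (st.2.1.1 + 1, st.2.1.2 ++ pvRecordLines sev (st.2.1.1 + 1) d), st.2.2)
  else if sev == "Minor" then
    (st.1, st.2.1, (st.2.2.1 + 1, st.2.2.2 ++ pvRecordLines sev (st.2.2.1 + 1) d))
  else st

def format_interaction_report_alt (interactions : List (List (String × String))) : String :=
  if interactions.isEmpty then "No significant drug interactions detected"
  else
    let st := interactions.foldl pvStep ((0, []), (0, []), (0, []))
    let parts := ["⚠️ DRUG INTERACTION REPORT", pvEq70,
                  "Total interactions found: " ++ toString interactions.length, ""]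
    let parts := parts ++ (if st.1.2.isEmpty then [] else
      "🔴 MAJOR INTERACTIONS (Contraindicated/Serious):" :: pvDash70 :: st.1.2)
    let parts := parts ++ (if st.2.1.2.isEmpty then [] else
      "\n🟡 MODERATE INTERACTIONS (Requires monitoring):" :: pvDash70 :: st.2.1.2)
    let parts := parts ++ (if st.2.2.2.isEmpty then [] else
      "\n🟢 MINOR INTERACTIONS (Usually not clinically significant):" :: pvDash70 :: st.2.2.2)
    PySem.Str.join "\n" parts

-- ===== PRECONDITION & SPEC =====
def pvHas (d : List (String × String)) (k : String) : Prop :=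
  ((PySem.Dict.ofList d).get? k).isSome = true

-- Pre_ excludes exactly the inputs on which Python A raises KeyError: a record missing
-- 'severity', or missing a field that its severity group's formatting reads.
def Pre_format_interaction_report (interactions : List (List (String × String))) : Prop :=
  ∀ d ∈ interactions, pvHas d "severity" ∧
    ((PySem.Dict.ofList d).get? "severity" = some "Major" →
       pvHas d "drug1" ∧ pvHas d "drug2" ∧ pvHas d "description" ∧
       pvHas d "clinical_recommendation" ∧ pvHas d "data_source") ∧
    ((PySem.Dict.ofList d).get? "severity" = some "Moderate" →
       pvHas d "drug1" ∧ pvHas d "drug2" ∧ pvHas d "description" ∧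
       pvHas d "clinical_recommendation") ∧
    ((PySem.Dict.ofList d).get? "severity" = some "Minor" →
       pvHas d "drug1" ∧ pvHas d "drug2" ∧ pvHas d "description")

instance (interactions : List (List (String × String))) : Decidable (Pre_format_interaction_report interactions) := by
  unfold Pre_format_interaction_report; unfold pvHas; infer_instance

def pvWitness_format_interaction_report : (List (List (String × String))) :=
  [[("severity", "Major"), ("drug1", "warfarin"), ("drug2", "aspirin"),
    ("description", "bleeding risk"), ("clinical_recommendation", "avoid"),
    ("data_source", "db")],
   [("severity", "Minor"), ("drug1", "a"), ("drug2", "b"), ("description", "d")]]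

def Spec_format_interaction_report (interactions : List (List (String × String))) (out : String) : Prop := out = format_interaction_report_alt interactions
instance (interactions : List (List (String × String))) (out : String) : Decidable (Spec_format_interaction_report interactions out) := by unfold Spec_format_interaction_report; infer_instance

-- ===== CLAIM (what is proved, stated in full; the proofs are below) =====
def Claim_equal_format_interaction_report : Prop := ∀ (interactions : List (List (String × String))), Dom_format_interaction_report interactions → Pre_format_interaction_report interactions → Spec_format_interaction_report interactions (format_interaction_report interactions)

-- ===== LEMMAS AND PROOFS =====
-- single-pass invariant: folding pvStep appends, to each buffer, exactly the lines A's
-- dedicated loop produces for that severity's filtered sublist, numbered from the counter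
lemma fold_pvStep (xs : List (List (String × String)))
    (cM cMo cMi : Nat) (lM lMo lMi : List String) :
    xs.foldl pvStep ((cM, lM), (cMo, lMo), (cMi, lMi)) =
      ((cM + (xs.filter (fun d => pvGet d "severity" == "Major")).length,
        lM ++ pvMajorLines (xs.filter (fun d => pvGet d "severity" == "Major")) (cM + 1)),
       (cMo + (xs.filter (fun d => pvGet d "severity" == "Moderate")).length,
        lMo ++ pvModerateLines (xs.filter (fun d => pvGet d "severity" == "Moderate")) (cMo + 1)),
       (cMi + (xs.filter (fun d => pvGet d "severity" == "Minor")).length,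
        lMi ++ pvMinorLines (xs.filter (fun d => pvGet d "severity" == "Minor")) (cMi + 1))) := by
  induction xs generalizing cM cMo cMi lM lMo lMi with
  | nil => simp [pvMajorLines, pvModerateLines, pvMinorLines]
  | cons d rest ih =>
    by_cases hMa : pvGet d "severity" = "Major"
    · simp [List.foldl, pvStep, hMa, ih, pvMajorLines, pvRecordLines,
        Nat.add_comm, Nat.add_assoc, Nat.add_left_comm]
    · by_cases hMo : pvGet d "severity" = "Moderate"
      · simp [List.foldl, pvStep, hMo, ih, pvModerateLines, pvRecordLines,
          Nat.add_comm, Nat.add_assoc, Nat.add_left_comm]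
      · by_cases hMi : pvGet d "severity" = "Minor"
        · simp [List.foldl, pvStep, hMi, ih, pvMinorLines, pvRecordLines,
            Nat.add_comm, Nat.add_assoc, Nat.add_left_comm]
        · simp [List.foldl, pvStep, hMa, hMo, hMi, ih]

lemma majorLines_isEmpty (xs : List (List (String × String))) (i : Nat) :
    (pvMajorLines xs i).isEmpty = xs.isEmpty := by
  cases xs <;> simp [pvMajorLines]

lemma moderateLines_isEmpty (xs : List (List (String × String))) (i : Nat) :
    (pvModerateLines xs i).isEmpty = xs.isEmpty := by
  cases xs <;> simp [pvModerateLines]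

lemma minorLines_isEmpty (xs : List (List (String × String))) (i : Nat) :
    (pvMinorLines xs i).isEmpty = xs.isEmpty := by
  cases xs <;> simp [pvMinorLines]

-- ===== VERDICT (by name: the statement is the Claim_ definition above) =====
theorem format_interaction_report_spec : Claim_equal_format_interaction_report := by
  intro interactions _ _
  unfold Spec_format_interaction_report
  unfold format_interaction_report format_interaction_report_alt
  by_cases h : interactions.isEmpty
  · simp [h]
  · simp only [h, fold_pvStep, List.nil_append, Nat.zero_add, if_neg, Bool.false_eq_true,
      not_false_eq_true, majorLines_isEmpty, moderateLines_isEmpty, minorLines_isEmpty]
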